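-- pv_equiv track=rewrite | github.com/freelawproject/blackletter | blackletter/core/advance_sheet.py | find_longest_run
-- ===== SOURCE A (Python) =====
-- from typing import Dict, List, Optional, Tuple
--
-- def find_longest_run(flags: List[bool], max_missing: int) -> Optional[Tuple[int, int]]:
--     """Find longest inclusive run of True values, bridging gaps up to max_missing False pages.
--
--     :param flags: list of boolean flags
--     :param max_missing: maximum consecutive False values to bridge
--     :return: (start_idx, end_idx) or None
--     """
--     hit_indices = [i for i, v in enumerate(flags) if v]
--     if not hit_indices:
--         return None
--
--     max_step = max_missing + 1
--     best_start = best_end = hit_indices[0]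
--     curr_start = curr_end = hit_indices[0]
--
--     for p in hit_indices[1:]:
--         if p - curr_end <= max_step:
--             curr_end = p
--         else:
--             if (curr_end - curr_start) > (best_end - best_start):
--                 best_start, best_end = curr_start, curr_end
--             curr_start = curr_end = p
--
--     if (curr_end - curr_start) > (best_end - best_start):
--         best_start, best_end = curr_start, curr_end
--
--     return best_start, best_end
-- ===== SOURCE B (Python) =====
-- from typing import List, Optional, Tuple
--
-- def find_longest_run(flags: List[bool], max_missing: int) -> Optional[Tuple[int, int]]:
--     """Single streaming pass over flags with a gap counter; no hit-index list."""
--     best: Optional[Tuple[int, int]] = None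
--     run: Optional[Tuple[int, int]] = None
--     gap = 0
--
--     def close(best, r):
--         if best is None or r[1] - r[0] > best[1] - best[0]:
--             return r
--         return best
--
--     for i, v in enumerate(flags):
--         if v:
--             if run is None:
--                 run = (i, i)
--             elif gap <= max_missing:
--                 run = (run[0], i)
--             else:
--                 best = close(best, run)
--                 run = (i, i)
--             gap = 0
--         elif run is not None:
--             gap += 1
--
--     if run is not None:
--         best = close(best, run)
--     return best
-- ===== Notes on version B (the rewrite author's own statement) =====
-- stated objective: simpler
-- what changed: B is one streaming pass over the flags themselves with a gap counter and an at-most-one open run, instead of materialising the list of True indices and scanning index differences over it.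
import Mathlib
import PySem

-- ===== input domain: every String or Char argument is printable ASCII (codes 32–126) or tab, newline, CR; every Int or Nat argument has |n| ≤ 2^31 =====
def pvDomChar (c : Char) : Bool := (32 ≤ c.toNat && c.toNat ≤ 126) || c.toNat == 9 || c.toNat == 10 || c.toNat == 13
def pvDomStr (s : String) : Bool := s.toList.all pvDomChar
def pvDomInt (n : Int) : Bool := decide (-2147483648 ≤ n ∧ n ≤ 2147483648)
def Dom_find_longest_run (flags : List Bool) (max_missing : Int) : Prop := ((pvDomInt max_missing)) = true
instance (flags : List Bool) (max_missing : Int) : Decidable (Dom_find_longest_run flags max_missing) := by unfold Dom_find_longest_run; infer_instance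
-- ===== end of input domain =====

-- B replaces A's hit-index list and index-difference scan by one streaming pass over the
-- flags with a gap counter (objective: simpler decomposition, same O(n) cost).

-- ===== PORT A =====
-- loop body of A's 'for p in hit_indices[1:]' (state = (best_start, best_end, curr_start, curr_end))
def stepA (max_step : Int) (s : Int × Int × Int × Int) (p : Int) : Int × Int × Int × Int :=
  if p - s.2.2.2 ≤ max_step then (s.1, s.2.1, s.2.2.1, p)
  else if s.2.2.2 - s.2.2.1 > s.2.1 - s.1 then (s.2.2.1, s.2.2.2, p, p)
  else (s.1, s.2.1, p, p)

-- A's trailing compare + return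
def finA (s : Int × Int × Int × Int) : Option (Int × Int) :=
  if s.2.2.2 - s.2.2.1 > s.2.1 - s.1 then some (s.2.2.1, s.2.2.2) else some (s.1, s.2.1)

def find_longest_run (flags : List Bool) (max_missing : Int) : Option (Int × Int) :=
  let hit_indices := ((PySem.List.enumerate flags 0).filter (fun p => p.2)).map (fun p => p.1)
  match hit_indices with
  | [] => none
  | h :: rest =>
    let max_step := max_missing + 1
    finA (rest.foldl (stepA max_step) (h, h, h, h))

-- ===== PORT B =====
-- B's 'close' helper: fold a finished run into the best-so-far
def closeB (best : Option (Int × Int)) (r : Int × Int) : Option (Int × Int) :=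
  match best with
  | none => some r
  | some b => if r.2 - r.1 > b.2 - b.1 then some r else some b

-- B's loop body over 'enumerate(flags)' (state = (best, run, gap))
def stepB (max_missing : Int) (s : Option (Int × Int) × Option (Int × Int) × Int)
    (iv : Int × Bool) : Option (Int × Int) × Option (Int × Int) × Int :=
  if iv.2 then
    match s.2.1 with
    | none => (s.1, some (iv.1, iv.1), 0)
    | some r =>
      if s.2.2 ≤ max_missing then (s.1, some (r.1, iv.1), 0)
      else (closeB s.1 r, some (iv.1, iv.1), 0)
  else
    match s.2.1 with
    | none => s
    | some _ => (s.1, s.2.1, s.2.2 + 1)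

def find_longest_run_alt (flags : List Bool) (max_missing : Int) : Option (Int × Int) :=
  let s := (PySem.List.enumerate flags 0).foldl (stepB max_missing) (none, none, 0)
  match s.2.1 with
  | none => s.1
  | some r => closeB s.1 r

-- ===== PRECONDITION & SPEC =====
def Spec_find_longest_run (flags : List Bool) (max_missing : Int) (out : Option (Int × Int)) : Prop := out = find_longest_run_alt flags max_missing
instance (flags : List Bool) (max_missing : Int) (out : Option (Int × Int)) : Decidable (Spec_find_longest_run flags max_missing out) := by unfold Spec_find_longest_run; infer_instance

-- ===== CLAIM (what is proved, stated in full; the proofs are below) =====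
def Claim_equal_find_longest_run : Prop := ∀ (flags : List Bool) (max_missing : Int), Dom_find_longest_run flags max_missing → Spec_find_longest_run flags max_missing (find_longest_run flags max_missing)

-- ===== LEMMAS AND PROOFS =====

-- the True indices of l, when l sits at offset n of the original list
def hitsFrom (n : Int) (l : List Bool) : List Int :=
  ((PySem.List.enumerate l n).filter (fun p => p.2)).map (fun p => p.1)

theorem hitsFrom_nil (n : Int) : hitsFrom n [] = [] := by
  simp [hitsFrom, PySem.List.enumerate_nil]

theorem hitsFrom_cons_true (n : Int) (t : List Bool) :
    hitsFrom n (true :: t) = n :: hitsFrom (n + 1) t := by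
  simp [hitsFrom, PySem.List.enumerate_cons]

theorem hitsFrom_cons_false (n : Int) (t : List Bool) :
    hitsFrom n (false :: t) = hitsFrom (n + 1) t := by
  simp [hitsFrom, PySem.List.enumerate_cons]

theorem stepB_false_some (mm n g cs ce : Int) (best : Option (Int × Int)) :
    stepB mm (best, some (cs, ce), g) (n, false) = (best, some (cs, ce), g + 1) := rfl

theorem stepB_false_none (mm n g : Int) (best : Option (Int × Int)) :
    stepB mm (best, none, g) (n, false) = (best, none, g) := rfl

theorem stepB_true_none (mm n g : Int) (best : Option (Int × Int)) :
    stepB mm (best, none, g) (n, true) = (best, some (n, n), 0) := rfl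

theorem stepB_true_ext (mm n g cs ce : Int) (best : Option (Int × Int)) (h : g ≤ mm) :
    stepB mm (best, some (cs, ce), g) (n, true) = (best, some (cs, n), 0) := by
  simp only [stepB, if_true]
  rw [if_pos h]

theorem stepB_true_close (mm n g cs ce : Int) (best : Option (Int × Int)) (h : ¬ g ≤ mm) :
    stepB mm (best, some (cs, ce), g) (n, true) = (closeB best (cs, ce), some (n, n), 0) := by
  simp only [stepB, if_true]
  rw [if_neg h]

-- simulation: once a run is open, A's fold over the remaining hit indices (plus its
-- trailing compare) equals B's fold over the remaining enumerated flags (plus its flush)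
theorem main_sim (mm : Int) (l : List Bool) : ∀ (n bs be cs ce g : Int)
    (best : Option (Int × Int)),
    cs ≤ ce → ce < n → g = n - 1 - ce →
    ((best = none ∧ bs = cs ∧ be = cs) ∨ best = some (bs, be)) →
    finA ((hitsFrom n l).foldl (stepA (mm + 1)) (bs, be, cs, ce)) =
      (let s := (PySem.List.enumerate l n).foldl (stepB mm) (best, some (cs, ce), g)
       match s.2.1 with
       | none => s.1
       | some r => closeB s.1 r) := by
  induction l with
  | nil =>
    intro n bs be cs ce g best hle _ _ hinv
    simp only [hitsFrom_nil, PySem.List.enumerate_nil, List.foldl_nil]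
    rcases hinv with ⟨hb, hbs, hbe⟩ | hb
    · subst hb
      by_cases h : ce - cs > be - bs
      · simp only [finA, closeB]
        rw [if_pos h]
      · simp only [finA, closeB]
        rw [if_neg h]
        have h4 : be = ce := by omega
        rw [hbs, h4]
    · subst hb
      simp only [finA, closeB]
  | cons v t ih =>
    intro n bs be cs ce g best hle hlt hg hinv
    cases v with
    | false =>
      rw [hitsFrom_cons_false, PySem.List.enumerate_cons, List.foldl_cons,
        stepB_false_some]
      exact ih (n + 1) bs be cs ce (g + 1) best hle (by omega) (by omega) hinv
    | true =>
      rw [hitsFrom_cons_true, List.foldl_cons, PySem.List.enumerate_cons, List.foldl_cons]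
      by_cases hext : g ≤ mm
      · -- extend the current run
        have hA : stepA (mm + 1) (bs, be, cs, ce) n = (bs, be, cs, n) := by
          simp only [stepA]; rw [if_pos (by omega : n - ce ≤ mm + 1)]
        rw [hA, stepB_true_ext mm n g cs ce best hext]
        exact ih (n + 1) bs be cs n 0 best (by omega) (by omega) (by omega) hinv
      · -- close the current run, start a new one at n
        rw [stepB_true_close mm n g cs ce best hext]
        by_cases hbig : ce - cs > be - bs
        · have hA : stepA (mm + 1) (bs, be, cs, ce) n = (cs, ce, n, n) := by
            simp only [stepA]
            rw [if_neg (by omega : ¬ n - ce ≤ mm + 1), if_pos hbig]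
          rw [hA]
          have hclose : closeB best (cs, ce) = some (cs, ce) := by
            rcases hinv with ⟨hb, hbs, hbe⟩ | hb
            · subst hb; rfl
            · subst hb; simp only [closeB]; rw [if_pos hbig]
          rw [hclose]
          exact ih (n + 1) cs ce n n 0 _ le_rfl (by omega) (by omega) (Or.inr rfl)
        · have hA : stepA (mm + 1) (bs, be, cs, ce) n = (bs, be, n, n) := by
            simp only [stepA]
            rw [if_neg (by omega : ¬ n - ce ≤ mm + 1), if_neg hbig]
          rw [hA]
          have hclose : closeB best (cs, ce) = some (bs, be) := by
            rcases hinv with ⟨hb, hbs, hbe⟩ | hb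
            · subst hb
              simp only [closeB]
              have h4 : ce = be := by omega
              rw [← hbs, h4]
            · subst hb; simp only [closeB]; rw [if_neg hbig]
          rw [hclose]
          exact ih (n + 1) bs be n n 0 _ le_rfl (by omega) (by omega) (Or.inr rfl)

-- before the first hit: B carries (none, none, g), A's hit list is still ahead
theorem zero_sim (mm : Int) (l : List Bool) : ∀ (n g : Int),
    (match hitsFrom n l with
     | [] => none
     | h :: rest => finA (rest.foldl (stepA (mm + 1)) (h, h, h, h))) =
      (let s := (PySem.List.enumerate l n).foldl (stepB mm) (none, none, g)
       match s.2.1 with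
       | none => s.1
       | some r => closeB s.1 r) := by
  induction l with
  | nil => intro n g; simp [hitsFrom_nil, PySem.List.enumerate_nil]
  | cons v t ih =>
    intro n g
    cases v with
    | false =>
      rw [hitsFrom_cons_false, PySem.List.enumerate_cons, List.foldl_cons,
        stepB_false_none]
      exact ih (n + 1) g
    | true =>
      rw [hitsFrom_cons_true, PySem.List.enumerate_cons, List.foldl_cons,
        stepB_true_none]
      exact main_sim mm t (n + 1) n n n n 0 none le_rfl (by omega) (by omega)
        (Or.inl ⟨rfl, rfl, rfl⟩)

-- ===== VERDICT (by name: the statement is the Claim_ definition above) =====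
theorem find_longest_run_spec : Claim_equal_find_longest_run := by
  intro flags max_missing _
  unfold Spec_find_longest_run find_longest_run find_longest_run_alt
  have := zero_sim max_missing flags 0 0
  simpa [hitsFrom] using this
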